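-- pv_equiv track=rewrite | github.com/helpfuldolphin/mathledger | backend/metrics/budget_admissibility.py | _compute_invalid_streaks
-- ===== SOURCE A (Python) =====
-- from typing import Any, Dict, List, Optional, Sequence
--
-- def _compute_invalid_streaks(classifications: List[str]) -> Dict[str, Any]:
--     """
--     Compute distribution of consecutive INVALID streaks.
--
--     Returns:
--         - max_streak: longest consecutive INVALID run
--         - streak_count: number of distinct INVALID streaks
--         - total_invalids: total INVALID classifications
--     """
--     if not classifications:
--         return {
--             "max_streak": 0,
--             "streak_count": 0,
--             "total_invalids": 0,
--         }
--
--     max_streak = 0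
--     streak_count = 0
--     current_streak = 0
--     total_invalids = 0
--
--     for c in classifications:
--         if c == "INVALID":
--             current_streak += 1
--             total_invalids += 1
--             max_streak = max(max_streak, current_streak)
--         else:
--             if current_streak > 0:
--                 streak_count += 1
--             current_streak = 0
--
--     # Count final streak if it ended with INVALID
--     if current_streak > 0:
--         streak_count += 1
--
--     return {
--         "max_streak": max_streak,
--         "streak_count": streak_count,
--         "total_invalids": total_invalids,
--     }
-- ===== SOURCE B (Python) =====
-- def _compute_invalid_streaks(classifications):
--     """Group-then-aggregate: collect the lengths of maximal consecutive
--     INVALID runs, then aggregate them in one go."""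
--     lengths = []
--     i, n = 0, len(classifications)
--     while i < n:
--         if classifications[i] == "INVALID":
--             j = i
--             while j < n and classifications[j] == "INVALID":
--                 j += 1
--             lengths.append(j - i)
--             i = j
--         else:
--             i += 1
--     return {
--         "max_streak": max(lengths, default=0),
--         "streak_count": len(lengths),
--         "total_invalids": sum(lengths),
--     }
-- ===== Notes on version B (the rewrite author's own statement) =====
-- stated objective: alternative
-- what changed: B first extracts the list of maximal consecutive INVALID run lengths (skipping over each run in a block), then computes max/count/sum of that list, instead of A's single stateful pass with a running streak counter and a trailing-streak fix-up.
import Mathlib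
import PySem

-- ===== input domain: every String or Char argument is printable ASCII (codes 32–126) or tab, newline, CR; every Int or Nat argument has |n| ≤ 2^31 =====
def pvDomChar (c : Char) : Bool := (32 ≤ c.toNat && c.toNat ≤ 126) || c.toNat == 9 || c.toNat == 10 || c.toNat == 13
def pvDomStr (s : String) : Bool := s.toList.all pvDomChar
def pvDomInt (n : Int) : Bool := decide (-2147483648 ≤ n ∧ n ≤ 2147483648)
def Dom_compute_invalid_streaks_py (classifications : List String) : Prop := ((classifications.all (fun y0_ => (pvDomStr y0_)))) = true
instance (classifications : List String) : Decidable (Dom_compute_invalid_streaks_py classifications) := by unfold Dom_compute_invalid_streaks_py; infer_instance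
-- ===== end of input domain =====

-- B extracts the lengths of the maximal consecutive INVALID runs and aggregates
-- them (max/count/sum), replacing A's stateful pass with trailing-streak fix-up;
-- objective: alternative decomposition, same cost.

-- ===== PORT A =====
-- loop body of A: state (max_streak, streak_count, current_streak, total_invalids)
def pvStepA (st : Int × Int × Int × Int) (c : String) : Int × Int × Int × Int :=
  match st with
  | (ms, sc, cs, tv) =>
    if c = "INVALID" then (max ms (cs + 1), sc, cs + 1, tv + 1)
    else (ms, if cs > 0 then sc + 1 else sc, 0, tv)

def compute_invalid_streaks_py (classifications : List String) : List (String × Int) :=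
  if classifications = [] then
    [("max_streak", 0), ("streak_count", 0), ("total_invalids", 0)]
  else
    let st := classifications.foldl pvStepA (0, 0, 0, 0)
    [("max_streak", st.1),
     ("streak_count", if st.2.2.1 > 0 then st.2.1 + 1 else st.2.1),
     ("total_invalids", st.2.2.2)]

-- ===== PORT B =====
-- lengths of the maximal consecutive "INVALID" runs, left to right (B's inner
-- while-loop that skips a whole run is the takeWhile/dropWhile step)
def pvInvalidRuns : List String → List Int
  | [] => []
  | c :: rest =>
    if c = "INVALID" then
      (1 + ((rest.takeWhile (fun x => x == "INVALID")).length : Int))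
        :: pvInvalidRuns (rest.dropWhile (fun x => x == "INVALID"))
    else pvInvalidRuns rest
termination_by l => l.length
decreasing_by
  · simpa using Nat.lt_succ_of_le (List.length_dropWhile_le _ _)
  · simp

def compute_invalid_streaks_py_alt (classifications : List String) : List (String × Int) :=
  let lengths := pvInvalidRuns classifications
  [("max_streak", lengths.foldl max 0),
   ("streak_count", (lengths.length : Int)),
   ("total_invalids", lengths.sum)]

-- ===== PRECONDITION & SPEC =====
def Spec_compute_invalid_streaks_py (classifications : List String) (out : List (String × Int)) : Prop := out = compute_invalid_streaks_py_alt classifications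
instance (classifications : List String) (out : List (String × Int)) : Decidable (Spec_compute_invalid_streaks_py classifications out) := by unfold Spec_compute_invalid_streaks_py; infer_instance

-- ===== CLAIM (what is proved, stated in full; the proofs are below) =====
def Claim_equal_compute_invalid_streaks_py : Prop := ∀ (classifications : List String), Dom_compute_invalid_streaks_py classifications → Spec_compute_invalid_streaks_py classifications (compute_invalid_streaks_py classifications)

-- ===== LEMMAS AND PROOFS =====

-- the trailing-streak fix-up of A, on (ms, sc, cs, tv), keeping (ms, sc', tv)
def pvFinish (st : Int × Int × Int × Int) : Int × Int × Int :=
  (st.1, if st.2.2.1 > 0 then st.2.1 + 1 else st.2.1, st.2.2.2)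

theorem stepA_invalid (ms sc cs tv : Int) :
    pvStepA (ms, sc, cs, tv) "INVALID" = (max ms (cs + 1), sc, cs + 1, tv + 1) := by
  simp [pvStepA]

theorem stepA_other (ms sc cs tv : Int) (c : String) (hc : c ≠ "INVALID") :
    pvStepA (ms, sc, cs, tv) c = (ms, if cs > 0 then sc + 1 else sc, 0, tv) := by
  simp [pvStepA, hc]

theorem invalidRuns_replicate_succ (k : ℕ) (l : List String) :
    pvInvalidRuns (List.replicate (k + 1) "INVALID" ++ l)
      = ((k + 1 : Int) + ((l.takeWhile (fun x => x == "INVALID")).length : Int))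
        :: pvInvalidRuns (l.dropWhile (fun x => x == "INVALID")) := by
  rw [List.replicate_succ, List.cons_append, pvInvalidRuns]
  simp
  ring

theorem foldl_max_ge (l : List Int) (a : Int) : a ≤ l.foldl max a := by
  induction l generalizing a with
  | nil => simp
  | cons x xs ih => exact le_trans (le_max_left a x) (ih (max a x))

theorem foldl_max_pull (l : List Int) (a b : Int) :
    l.foldl max (max b a) = max a (l.foldl max b) := by
  induction l generalizing a b with
  | nil => simp [max_comm]
  | cons x xs ih =>
      simp only [List.foldl_cons]
      rw [show max (max b a) x = max (max b x) a by
            rw [max_assoc, max_assoc, max_comm a x], ih]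

-- Main invariant: running A's loop from a state with current streak k (already
-- counted in ms and tv), then applying the fix-up, yields B's aggregates over
-- the runs of (replicate k "INVALID" ++ l).
theorem loop_invariant (l : List String) (k : ℕ) (ms sc tv : Int)
    (hms : (k : Int) ≤ ms) :
    pvFinish (l.foldl pvStepA (ms, sc, (k : Int), tv))
    = (max ms ((pvInvalidRuns (List.replicate k "INVALID" ++ l)).foldl max 0),
       sc + ((pvInvalidRuns (List.replicate k "INVALID" ++ l)).length : Int),
       tv + (pvInvalidRuns (List.replicate k "INVALID" ++ l)).sum - (k : Int)) := by
  induction l generalizing k ms sc tv with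
  | nil =>
      simp only [List.foldl_nil, pvFinish]
      cases k with
      | zero =>
          simp only [List.replicate_zero, List.nil_append, pvInvalidRuns,
            List.foldl_nil, List.length_nil, List.sum_nil, Nat.cast_zero]
          simp only [Prod.mk.injEq]
          push_cast at hms
          refine ⟨(max_eq_left hms).symm, by simp, by ring⟩
      | succ k =>
          rw [show (List.replicate (k+1) "INVALID" ++ ([] : List String))
                = List.replicate (k+1) "INVALID" ++ [] by rfl,
              invalidRuns_replicate_succ k []]
          simp only [List.takeWhile_nil, List.dropWhile_nil, List.length_nil,
            Nat.cast_zero, add_zero, pvInvalidRuns, List.foldl_cons,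
            List.foldl_nil, List.length_cons, List.sum_cons, List.sum_nil,
            List.length_nil]
          simp only [Prod.mk.injEq]
          push_cast at hms ⊢
          refine ⟨(max_eq_left hms).symm, by simp, by ring⟩
  | cons c l ih =>
      by_cases hc : c = "INVALID"
      · subst hc
        have hrepl : List.replicate k "INVALID" ++ ("INVALID" :: l)
            = List.replicate (k + 1) "INVALID" ++ l := by
          simp [List.replicate_succ']
        rw [hrepl]
        rw [List.foldl_cons, stepA_invalid]
        have hkm : ((k + 1 : ℕ) : Int) ≤ max ms ((k : Int) + 1) := by
          push_cast; exact le_max_right _ _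
        have hrec := ih (k + 1) (max ms ((k : Int) + 1)) sc (tv + 1) hkm
        push_cast at hrec
        rw [hrec]
        have hge : ((k : Int) + 1) ≤
            (pvInvalidRuns (List.replicate (k + 1) "INVALID" ++ l)).foldl max 0 := by
          rw [invalidRuns_replicate_succ]
          simp only [List.foldl_cons]
          refine le_trans ?_ (foldl_max_ge _ _)
          have h0 : (0:Int) ≤ ((l.takeWhile (fun x => x == "INVALID")).length : Int) := by
            positivity
          omega
        generalize hM : (pvInvalidRuns (List.replicate (k + 1) "INVALID" ++ l)).foldl max 0 = M at hge ⊢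
        simp only [Prod.mk.injEq]
        refine ⟨?_, ?_, ?_⟩
        · rw [max_assoc, max_eq_right hge]
        · trivial
        · omega
      · rw [List.foldl_cons, stepA_other _ _ _ _ _ hc]
        have hcb : (c == "INVALID") = false := by simpa using hc
        cases Nat.eq_zero_or_pos k with
        | inl hk0 =>
            subst hk0
            have hrec := ih 0 ms sc tv (by exact_mod_cast hms)
            simp only [List.replicate_zero, List.nil_append, Nat.cast_zero] at hrec
            have hruns : pvInvalidRuns (List.replicate 0 "INVALID" ++ (c :: l))
                = pvInvalidRuns l := by
              rw [List.replicate_zero, List.nil_append, pvInvalidRuns]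
              simp [hc]
            rw [hruns]
            simp only [Nat.cast_zero, gt_iff_lt, lt_irrefl, if_false]
            rw [hrec]
        | inr hkpos =>
            obtain ⟨k', rfl⟩ : ∃ k', k = k' + 1 := ⟨k - 1, by omega⟩
            have hrec := ih 0 ms (sc + 1) tv (le_trans (by positivity) hms)
            simp only [List.replicate_zero, List.nil_append, Nat.cast_zero] at hrec
            have hcl : pvInvalidRuns (c :: l) = pvInvalidRuns l := by
              rw [pvInvalidRuns]; simp [hc]
            have ht : (c :: l).takeWhile (fun x => x == "INVALID") = [] := by
              simp [hcb]
            have hd : (c :: l).dropWhile (fun x => x == "INVALID") = c :: l := by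
              simp [hcb]
            have hruns : pvInvalidRuns (List.replicate (k' + 1) "INVALID" ++ (c :: l))
                = (((k' : Int) + 1)) :: pvInvalidRuns l := by
              rw [invalidRuns_replicate_succ, ht, hd, hcl]
              norm_num
            rw [hruns]
            have hcs : (((k' + 1 : ℕ) : Int) > 0) := by push_cast; omega
            rw [if_pos hcs, hrec]
            simp only [List.foldl_cons, List.length_cons, List.sum_cons]
            have hms' : ((k' : Int) + 1) ≤ ms := by push_cast at hms; omega
            have hmax : max ms ((pvInvalidRuns l).foldl max (max 0 ((k' : Int) + 1)))
                = max ms ((pvInvalidRuns l).foldl max 0) := by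
              rw [foldl_max_pull, ← max_assoc, max_eq_left hms']
            rw [hmax]
            simp only [Prod.mk.injEq, true_and]
            refine ⟨by push_cast; ring, by push_cast; ring⟩

-- ===== VERDICT (by name: the statement is the Claim_ definition above) =====
theorem compute_invalid_streaks_py_spec : Claim_equal_compute_invalid_streaks_py := by
  intro l _
  unfold Spec_compute_invalid_streaks_py compute_invalid_streaks_py compute_invalid_streaks_py_alt
  by_cases hl : l = []
  · subst hl; simp [pvInvalidRuns]
  · rw [if_neg hl]
    have h := loop_invariant l 0 0 0 0 (by norm_num)
    simp only [List.replicate_zero, List.nil_append, Nat.cast_zero] at h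
    have h1 := congrArg Prod.fst h
    have h2 := congrArg (fun p => p.2.1) h
    have h3 := congrArg (fun p => p.2.2) h
    simp only [pvFinish] at h1 h2 h3
    have hm : max 0 ((pvInvalidRuns l).foldl max 0) = (pvInvalidRuns l).foldl max 0 :=
      max_eq_right (foldl_max_ge _ _)
    simp only []
    rw [h1, h2, h3, hm]
    norm_num
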